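-- pv_equiv track=rewrite | github.com/aws-samples/genai-quickstart-pocs | amazon-bedrock-video-chapter-search-poc/ingestionlogic.py | srt_to_transcript
-- ===== SOURCE A (Python) =====
-- def srt_to_transcript(srt_text):
--     """
--     Converts .srt subtitle text to a plain text transcript.
--
--     Args:
--         srt_text (str): The .srt formatted text
--
--     Returns:
--         str: The plain text transcript.
--     """
--     transcript = ""
--     lines = srt_text.split("\n")
--
--     # Iterate through the lines in the .srt file
--     i = 0
--     while i < len(lines):
--         # Skip the line with the section number
--         if lines[i].strip().isdigit():
--             i += 2
--
--
--         # Get the subtitle text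
--         subtitle_text = ""
--         while i < len(lines) and lines[i].strip():
--             subtitle_text += lines[i].strip() + " "
--             i += 1
--
--         # Add the subtitle text to the transcript
--         if subtitle_text.strip():
--             transcript += " " + subtitle_text.strip()
--
--         # Skip the empty line
--         if i < len(lines) and not lines[i].strip():
--             i += 1
--
--     return transcript.strip()
-- ===== SOURCE B (Python) =====
-- def srt_to_transcript(srt_text):
--     """
--     Converts .srt subtitle text to a plain text transcript.
--
--     Single-pass three-state machine over the lines: at a block start a
--     numeric line causes the following line to be skipped unconditionally;
--     inside a block every non-blank line is a word group; a blank line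
--     returns to block start.  The collected pieces are joined with spaces.
--     """
--     words = []
--     state = 0  # 0 = block start, 1 = skip this line, 2 = inside subtitle text
--     for raw in srt_text.split("\n"):
--         line = raw.strip()
--         if state == 1:
--             state = 2
--         elif state == 0 and line.isdigit():
--             state = 1
--         elif not line:
--             state = 0
--         else:
--             words.append(line)
--             state = 2
--     return " ".join(words)
-- ===== Notes on version B (the rewrite author's own statement) =====
-- stated objective: simpler
-- what changed: Replaces A's index-driven nested while loops that concatenate into a growing transcript string by a single forward pass of a three-state machine (block start / skip line / in text) that collects the stripped lines into a list and joins them once at the end.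
import Mathlib
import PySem

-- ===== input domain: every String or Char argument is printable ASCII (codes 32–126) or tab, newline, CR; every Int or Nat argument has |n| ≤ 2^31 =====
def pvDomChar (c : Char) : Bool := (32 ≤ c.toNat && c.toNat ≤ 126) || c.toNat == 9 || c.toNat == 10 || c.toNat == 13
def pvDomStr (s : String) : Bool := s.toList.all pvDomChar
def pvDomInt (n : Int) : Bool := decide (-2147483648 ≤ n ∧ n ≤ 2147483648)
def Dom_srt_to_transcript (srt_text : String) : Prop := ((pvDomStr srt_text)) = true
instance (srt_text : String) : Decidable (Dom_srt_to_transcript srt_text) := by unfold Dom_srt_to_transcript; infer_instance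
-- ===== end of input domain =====

-- B replaces A's index-driven state machine by a single three-state pass that collects
-- the stripped lines into a list and joins them once; objective: simpler.

-- ===== PORT A =====
-- inner while: 'while i < len(lines) and lines[i].strip(): subtitle_text += lines[i].strip() + " "; i += 1'
-- returns (subtitle_text, the remaining lines from position i)
def srtCollectA : List (List Char) → List Char → List Char × List (List Char)
  | [], sub => (sub, [])
  | l :: rest, sub =>
    if (PySem.Chars.strip l).isEmpty then (sub, l :: rest)
    else srtCollectA rest (sub ++ PySem.Chars.strip l ++ [' '])

-- 'if i < len(lines) and not lines[i].strip(): i += 1'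
def srtSkipBlankA : List (List Char) → List (List Char)
  | [] => []
  | h :: r => if (PySem.Chars.strip h).isEmpty then r else h :: r

-- outer 'while i < len(lines)' over the remaining lines; fuel = the initial number of
-- lines, which bounds the iteration count since every iteration consumes ≥ 1 line
def srtOuterA : Nat → List (List Char) → List Char → List Char
  | 0, _, t => t
  | _ + 1, [], t => t
  | fuel + 1, l :: rest, t =>
    -- 'if lines[i].strip().isdigit(): i += 2'
    let ls1 := if PySem.Chars.strIsdigit (PySem.Chars.strip l) then rest.drop 1 else l :: rest
    let p := srtCollectA ls1 []
    -- 'if subtitle_text.strip(): transcript += " " + subtitle_text.strip()'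
    let t1 := if (PySem.Chars.strip p.1).isEmpty then t else t ++ ' ' :: PySem.Chars.strip p.1
    srtOuterA fuel (srtSkipBlankA p.2) t1

def srt_to_transcript (srt_text : String) : String :=
  let lines := PySem.Chars.splitOn srt_text.toList ['\n']
  String.ofList (PySem.Chars.strip (srtOuterA lines.length lines []))

-- ===== PORT B =====
-- one step of Source B's loop body; state 0 = block start, 1 = skip this line, 2 = in text
def srtStepB (st : Nat × List (List Char)) (raw : List Char) : Nat × List (List Char) :=
  let line := PySem.Chars.strip raw
  if st.1 = 1 then (2, st.2)
  else if st.1 = 0 ∧ PySem.Chars.strIsdigit line then (1, st.2)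
  else if line.isEmpty then (0, st.2)
  else (2, st.2 ++ [line])

def srt_to_transcript_alt (srt_text : String) : String :=
  let lines := PySem.Chars.splitOn srt_text.toList ['\n']
  String.ofList (PySem.Chars.join [' '] (lines.foldl srtStepB (0, [])).2)

-- ===== PRECONDITION & SPEC =====
def Spec_srt_to_transcript (srt_text : String) (out : String) : Prop := out = srt_to_transcript_alt srt_text
instance (srt_text : String) (out : String) : Decidable (Spec_srt_to_transcript srt_text out) := by unfold Spec_srt_to_transcript; infer_instance

-- ===== CLAIM (what is proved, stated in full; the proofs are below) =====
def Claim_equal_srt_to_transcript : Prop := ∀ (srt_text : String), Dom_srt_to_transcript srt_text → Spec_srt_to_transcript srt_text (srt_to_transcript srt_text)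

-- ===== LEMMAS AND PROOFS =====

-- predicate 'this line is non-blank after stripping'
def srtP (l : List Char) : Bool := !(PySem.Chars.strip l).isEmpty

-- A's transcript accumulator as a function of B's word list: "" or " w1 w2 …"
def srtT (ws : List (List Char)) : List Char :=
  if ws.isEmpty then [] else ' ' :: PySem.Chars.join [' '] ws

-- a word is nonempty with non-whitespace first and last character
def srtNoSp (w : List Char) : Prop :=
  w ≠ [] ∧ (∀ c ∈ w.head?, PySem.Chars.isspace c = false) ∧
    (∀ c ∈ w.getLast?, PySem.Chars.isspace c = false)

theorem srtOuterA_nil (fuel : Nat) (t : List Char) : srtOuterA fuel [] t = t := by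
  cases fuel <;> rfl

theorem srtCollectA_spec (ls : List (List Char)) (sub : List Char) :
    srtCollectA ls sub =
      (sub ++ ((ls.takeWhile srtP).map (fun l => PySem.Chars.strip l ++ [' '])).flatten,
       ls.dropWhile srtP) := by
  induction ls generalizing sub with
  | nil => simp [srtCollectA]
  | cons l rest ih =>
    cases h : (PySem.Chars.strip l).isEmpty
    · simp [srtCollectA, h, srtP, ih]
    · simp [srtCollectA, h, srtP]

theorem srtStepB_skip (ws : List (List Char)) (raw : List Char) :
    srtStepB (1, ws) raw = (2, ws) := by simp [srtStepB]

theorem srtStepB_digit (ws : List (List Char)) (raw : List Char)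
    (h : PySem.Chars.strIsdigit (PySem.Chars.strip raw) = true) :
    srtStepB (0, ws) raw = (1, ws) := by simp [srtStepB, h]

theorem srtStepB_blank (st : Nat) (ws : List (List Char)) (raw : List Char)
    (hst : st ≠ 1) (h : (PySem.Chars.strip raw).isEmpty = true) :
    srtStepB (st, ws) raw = (0, ws) := by
  have hd : PySem.Chars.strIsdigit (PySem.Chars.strip raw) = false := by
    rcases List.isEmpty_iff.mp h with h'
    simp [PySem.Chars.strIsdigit, h']
  simp [srtStepB, hst, h, hd]

theorem srtStepB_word (st : Nat) (ws : List (List Char)) (raw : List Char)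
    (hst : st ≠ 1) (h : (PySem.Chars.strip raw).isEmpty = false)
    (hd : st = 0 → PySem.Chars.strIsdigit (PySem.Chars.strip raw) = false) :
    srtStepB (st, ws) raw = (2, ws ++ [PySem.Chars.strip raw]) := by
  by_cases h0 : st = 0
  · simp [srtStepB, h, h0, hd h0]
  · simp [srtStepB, hst, h, h0]

theorem srtFold2 (ls : List (List Char)) (ws : List (List Char)) :
    (ls.foldl srtStepB (2, ws)).2 =
      ((ls.dropWhile srtP).tail.foldl srtStepB
        (0, ws ++ (ls.takeWhile srtP).map PySem.Chars.strip)).2 := by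
  induction ls generalizing ws with
  | nil => simp
  | cons l rest ih =>
    cases h : (PySem.Chars.strip l).isEmpty
    · rw [List.foldl_cons, srtStepB_word 2 ws l (by omega) h (by omega)]
      rw [ih]
      simp [srtP, h]
    · rw [List.foldl_cons, srtStepB_blank 2 ws l (by omega) h]
      simp [srtP, h]

theorem srtNoSp_strip (l : List Char) (h : PySem.Chars.strip l ≠ []) :
    srtNoSp (PySem.Chars.strip l) := by
  refine ⟨h, ?_, ?_⟩
  · -- head: strip l is a prefix of lstrip l, whose head is non-space
    have hpre : PySem.Chars.strip l <+: PySem.Chars.lstrip l := by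
      show PySem.Chars.rstrip (PySem.Chars.lstrip l) <+: PySem.Chars.lstrip l
      unfold PySem.Chars.rstrip
      simpa using List.reverse_prefix.mpr
        (List.dropWhile_suffix (l := (PySem.Chars.lstrip l).reverse) PySem.Chars.isspace)
    rcases hpre with ⟨t, ht⟩
    intro c hc
    have hhead := List.head?_dropWhile_not PySem.Chars.isspace l
    have : (PySem.Chars.lstrip l).head? = some c := by
      rw [← ht, List.head?_append]
      rcases hne : (PySem.Chars.strip l).head? with _ | d
      · exact absurd (List.head?_eq_none_iff.mp hne) h
      · simpa [hne] using hc
    rw [PySem.Chars.lstrip] at this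
    rw [this] at hhead
    exact hhead
  · -- last: strip l = (dropWhile isspace (lstrip l).reverse).reverse
    intro c hc
    have hhead := List.head?_dropWhile_not PySem.Chars.isspace (PySem.Chars.lstrip l).reverse
    have : (List.dropWhile PySem.Chars.isspace (PySem.Chars.lstrip l).reverse).head? = some c := by
      have : (PySem.Chars.strip l).getLast? = some c := hc
      rwa [show PySem.Chars.strip l =
            (List.dropWhile PySem.Chars.isspace (PySem.Chars.lstrip l).reverse).reverse from rfl,
          List.getLast?_reverse] at this
    rw [this] at hhead
    exact hhead

theorem srtStrip_of_noSp (w : List Char) (h : srtNoSp w) : PySem.Chars.strip w = w := by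
  obtain ⟨hne, hh, hl⟩ := h
  have hlst : PySem.Chars.lstrip w = w := by
    rcases w with _ | ⟨c, x⟩
    · rfl
    · have := hh c (by simp)
      simp [PySem.Chars.lstrip, this]
  show PySem.Chars.rstrip (PySem.Chars.lstrip w) = w
  rw [hlst]
  have hw : w.dropLast ++ [w.getLast hne] = w := List.dropLast_append_getLast hne
  have hc := hl (w.getLast hne) (by rw [List.getLast?_eq_some_getLast hne]; simp)
  conv_lhs => rw [← hw]
  simp [PySem.Chars.rstrip, hc]
  rw [hw]

theorem srtNoSp_join (ws : List (List Char)) (hne : ws ≠ [])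
    (hall : ∀ w ∈ ws, srtNoSp w) : srtNoSp (PySem.Chars.join [' '] ws) := by
  induction ws with
  | nil => exact absurd rfl hne
  | cons w rest ih =>
    rcases rest with _ | ⟨v, rest'⟩
    · rw [PySem.Chars.join_singleton]; exact hall w (by simp)
    · obtain ⟨hw1, hw2, hw3⟩ := hall w (by simp)
      obtain ⟨hj1, hj2, hj3⟩ := ih (by simp) (fun u hu => hall u (by simp [hu]))
      rw [PySem.Chars.join_cons_cons]
      refine ⟨by simp [hw1], ?_, ?_⟩
      · intro c hc
        rw [List.append_assoc, List.head?_append] at hc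
        rcases hh : w.head? with _ | d
        · exact absurd (List.head?_eq_none_iff.mp hh) hw1
        · rw [hh, Option.some_or] at hc
          obtain rfl := Option.some.inj hc
          exact hw2 d (by simp [hh])
      · intro c hc
        rw [List.append_assoc,
            List.getLast?_append_of_ne_nil w
              (l₂ := [' '] ++ PySem.Chars.join [' '] (v :: rest')) (by simp),
            List.getLast?_append_of_ne_nil [' '] hj1] at hc
        exact hj3 c hc

theorem srtJoin_append (xs ys : List (List Char)) (hx : xs ≠ []) (hy : ys ≠ []) :
    PySem.Chars.join [' '] (xs ++ ys) =
      PySem.Chars.join [' '] xs ++ ' ' :: PySem.Chars.join [' '] ys := by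
  induction xs with
  | nil => exact absurd rfl hx
  | cons w rest ih =>
    rcases rest with _ | ⟨v, rest'⟩
    · rcases ys with _ | ⟨y, ys'⟩
      · exact absurd rfl hy
      · rw [PySem.Chars.join_singleton]
        show PySem.Chars.join [' '] (w :: y :: ys') = _
        rw [PySem.Chars.join_cons_cons]
        simp
    · rw [List.cons_append, List.cons_append, PySem.Chars.join_cons_cons,
          PySem.Chars.join_cons_cons, ← List.cons_append, ih (by simp)]
      simp

theorem srtFlatten_eq_join (ws : List (List Char)) (hne : ws ≠ []) :
    (ws.map (fun w => w ++ [' '])).flatten = PySem.Chars.join [' '] ws ++ [' '] := by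
  induction ws with
  | nil => exact absurd rfl hne
  | cons w rest ih =>
    rcases rest with _ | ⟨v, rest'⟩
    · simp [PySem.Chars.join_singleton]
    · rw [List.map_cons, List.flatten_cons, ih (by simp), PySem.Chars.join_cons_cons]
      simp

theorem srtStrip_join_space (ws : List (List Char)) (hne : ws ≠ [])
    (hall : ∀ w ∈ ws, srtNoSp w) :
    PySem.Chars.strip (PySem.Chars.join [' '] ws ++ [' ']) = PySem.Chars.join [' '] ws := by
  obtain ⟨hj1, hj2, hj3⟩ := srtNoSp_join ws hne hall
  rcases hj : PySem.Chars.join [' '] ws with _ | ⟨c, x⟩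
  · exact absurd hj hj1
  · have hc : PySem.Chars.isspace c = false := by rw [hj] at hj2; exact hj2 c (by simp)
    show PySem.Chars.rstrip (PySem.Chars.lstrip ((c :: x) ++ [' '])) = c :: x
    have h1 : PySem.Chars.lstrip ((c :: x) ++ [' ']) = (c :: x) ++ [' '] := by
      simp [PySem.Chars.lstrip, hc]
    rw [h1]
    have h2 : PySem.Chars.rstrip ((c :: x) ++ [' ']) = PySem.Chars.rstrip (c :: x) := by
      simp only [PySem.Chars.rstrip, List.reverse_append, List.reverse_cons,
        List.reverse_nil, List.nil_append, List.singleton_append]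
      rw [List.dropWhile_cons_of_pos (by decide)]
    rw [h2, ← hj]
    have := srtStrip_of_noSp (PySem.Chars.join [' '] ws) ⟨hj1, hj2, hj3⟩
    rw [show PySem.Chars.strip (PySem.Chars.join [' '] ws) =
          PySem.Chars.rstrip (PySem.Chars.lstrip (PySem.Chars.join [' '] ws)) from rfl] at this
    rw [show PySem.Chars.lstrip (PySem.Chars.join [' '] ws) =
          PySem.Chars.join [' '] ws from ?_] at this
    · exact this
    · rw [hj]; simp [PySem.Chars.lstrip, hc]

theorem srtT_append (ws pre : List (List Char)) (h : pre ≠ []) :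
    srtT ws ++ ' ' :: PySem.Chars.join [' '] pre = srtT (ws ++ pre) := by
  rcases ws with _ | ⟨w, ws'⟩
  · simp [srtT, h]
  · have h2 : srtT ((w :: ws') ++ pre) =
        ' ' :: PySem.Chars.join [' '] ((w :: ws') ++ pre) := by
      rw [List.cons_append]; simp [srtT]
    rw [h2, srtJoin_append (w :: ws') pre (by simp) h]
    simp [srtT]

theorem srtStrip_T (ws : List (List Char)) (hall : ∀ w ∈ ws, srtNoSp w) :
    PySem.Chars.strip (srtT ws) = PySem.Chars.join [' '] ws := by
  rcases ws with _ | ⟨w, ws'⟩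
  · rfl
  · show PySem.Chars.strip (' ' :: PySem.Chars.join [' '] (w :: ws')) = _
    have h1 : PySem.Chars.lstrip (' ' :: PySem.Chars.join [' '] (w :: ws')) =
        PySem.Chars.lstrip (PySem.Chars.join [' '] (w :: ws')) := by
      unfold PySem.Chars.lstrip
      rw [List.dropWhile_cons_of_pos (by decide)]
    show PySem.Chars.rstrip (PySem.Chars.lstrip _) = _
    rw [h1]
    exact srtStrip_of_noSp _ (srtNoSp_join (w :: ws') (by simp) hall)

theorem srtFold_noSp (ls : List (List Char)) (st : Nat × List (List Char))
    (h : ∀ w ∈ st.2, srtNoSp w) : ∀ w ∈ (ls.foldl srtStepB st).2, srtNoSp w := by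
  induction ls generalizing st with
  | nil => exact h
  | cons l rest ih =>
    rw [List.foldl_cons]
    apply ih
    have : (srtStepB st l).2 = st.2 ∨
        ((srtStepB st l).2 = st.2 ++ [PySem.Chars.strip l] ∧
          (PySem.Chars.strip l).isEmpty = false) := by
      rcases st with ⟨n, ws0⟩
      by_cases h1 : n = 1
      · exact Or.inl (by simp [srtStepB, h1])
      · by_cases hd : n = 0 ∧ PySem.Chars.strIsdigit (PySem.Chars.strip l) = true
        · exact Or.inl (by simp [srtStepB, hd])
        · cases hb : (PySem.Chars.strip l).isEmpty
          · exact Or.inr ⟨by simp [srtStepB, h1, hd, hb], rfl⟩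
          · exact Or.inl (by simp [srtStepB, h1, hd, hb])
    rcases this with heq | ⟨heq, hne⟩
    · rw [heq]; exact h
    · rw [heq]
      intro w hw
      rcases List.mem_append.mp hw with hw | hw
      · exact h w hw
      · rw [List.mem_singleton.mp hw]
        exact srtNoSp_strip l (by simpa using hne)

-- head of dropWhile fails the predicate
theorem srtDropWhile_head (ls : List (List Char)) (b : List Char) (r : List (List Char))
    (h : ls.dropWhile srtP = b :: r) : (PySem.Chars.strip b).isEmpty = true := by
  have := List.head?_dropWhile_not srtP ls
  rw [h] at this
  simp only [List.head?_cons] at this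
  simpa [srtP] using this

-- the collect-then-append-then-skip tail of one outer iteration, against B's state-2 fold
theorem srtPhase2 (fuel : Nat)
    (IH : ∀ ls ws, ls.length ≤ fuel → (∀ w ∈ ws, srtNoSp w) →
      srtOuterA fuel ls (srtT ws) = srtT ((ls.foldl srtStepB (0, ws)).2))
    (ls ws : List (List Char))
    (hlen : (ls.dropWhile srtP).tail.length ≤ fuel)
    (hws : ∀ w ∈ ws, srtNoSp w) :
    srtOuterA fuel (srtSkipBlankA (srtCollectA ls []).2)
      (if (PySem.Chars.strip (srtCollectA ls []).1).isEmpty then srtT ws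
       else srtT ws ++ ' ' :: PySem.Chars.strip (srtCollectA ls []).1)
    = srtT ((ls.foldl srtStepB (2, ws)).2) := by
  rw [srtCollectA_spec]
  set pre := ls.takeWhile srtP with hpre
  have hPall : ∀ l ∈ pre, (PySem.Chars.strip l).isEmpty = false := by
    intro l hl
    have := List.mem_takeWhile_imp hl
    simpa [srtP] using this
  by_cases hpe : pre = []
  · -- empty subtitle block
    rw [hpe]
    simp only [List.map_nil, List.flatten_nil, List.nil_append]
    rw [if_pos (show (PySem.Chars.strip ([] : List Char)).isEmpty = true from rfl)]
    rcases hd : ls.dropWhile srtP with _ | ⟨b, r3⟩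
    · rw [show srtSkipBlankA [] = [] from rfl, srtOuterA_nil, srtFold2, hd, ← hpre, hpe]
      simp
    · rw [show srtSkipBlankA (b :: r3) = r3 from by
          simp [srtSkipBlankA, srtDropWhile_head ls b r3 hd]]
      rw [srtFold2, hd, ← hpre, hpe]
      simp only [List.map_nil, List.append_nil, List.tail_cons]
      exact IH r3 ws (by rw [hd] at hlen; simpa using hlen) hws
  · -- nonempty subtitle block
    have hmapne : pre.map PySem.Chars.strip ≠ [] := by simpa using hpe
    have hmapall : ∀ w ∈ pre.map PySem.Chars.strip, srtNoSp w := by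
      intro w hw
      rcases List.mem_map.mp hw with ⟨l, hl, rfl⟩
      exact srtNoSp_strip l (by simpa using hPall l hl)
    have hflat : ((pre.map (fun l => PySem.Chars.strip l ++ [' '])).flatten) =
        PySem.Chars.join [' '] (pre.map PySem.Chars.strip) ++ [' '] := by
      rw [show pre.map (fun l => PySem.Chars.strip l ++ [' ']) =
            (pre.map PySem.Chars.strip).map (fun w => w ++ [' ']) from by
          rw [List.map_map]; rfl]
      exact srtFlatten_eq_join _ hmapne
    simp only [List.nil_append, hflat]
    rw [srtStrip_join_space _ hmapne hmapall]
    have hjne : PySem.Chars.join [' '] (pre.map PySem.Chars.strip) ≠ [] :=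
      (srtNoSp_join _ hmapne hmapall).1
    rw [if_neg (by simpa [List.isEmpty_iff] using hjne)]
    rw [srtT_append ws (pre.map PySem.Chars.strip) hmapne]
    have hws' : ∀ w ∈ ws ++ pre.map PySem.Chars.strip, srtNoSp w := by
      intro w hw
      rcases List.mem_append.mp hw with hw | hw
      · exact hws w hw
      · exact hmapall w hw
    rcases hd : ls.dropWhile srtP with _ | ⟨b, r3⟩
    · rw [show srtSkipBlankA [] = [] from rfl, srtOuterA_nil, srtFold2, hd, ← hpre]
      simp
    · rw [show srtSkipBlankA (b :: r3) = r3 from by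
          simp [srtSkipBlankA, srtDropWhile_head ls b r3 hd]]
      rw [srtFold2, hd, ← hpre]
      simp only [List.tail_cons]
      exact IH r3 _ (by rw [hd] at hlen; simpa using hlen) hws'

theorem srtMain (fuel : Nat) : ∀ (ls ws : List (List Char)), ls.length ≤ fuel →
    (∀ w ∈ ws, srtNoSp w) →
    srtOuterA fuel ls (srtT ws) = srtT ((ls.foldl srtStepB (0, ws)).2) := by
  induction fuel with
  | zero =>
    intro ls ws hlen _
    rw [List.length_eq_zero_iff.mp (Nat.le_zero.mp hlen)]
    rfl
  | succ fuel ih =>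
    intro ls ws hlen hws
    rcases ls with _ | ⟨l, rest⟩
    · rfl
    · by_cases hd : PySem.Chars.strIsdigit (PySem.Chars.strip l)
      · -- digit line: skip two
        rcases rest with _ | ⟨r, rest2⟩
        · show srtOuterA (fuel + 1) [l] (srtT ws) = _
          simp only [srtOuterA, if_pos hd, List.drop_nil]
          rw [show srtCollectA [] [] = ([], []) from rfl]
          rw [if_pos (show (PySem.Chars.strip ([] : List Char)).isEmpty = true from rfl)]
          rw [show srtSkipBlankA [] = [] from rfl, srtOuterA_nil]
          rw [List.foldl_cons, List.foldl_nil, srtStepB_digit ws l hd]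
        · show srtOuterA (fuel + 1) (l :: r :: rest2) (srtT ws) = _
          simp only [srtOuterA, if_pos hd, List.drop_succ_cons, List.drop_zero]
          rw [List.foldl_cons, srtStepB_digit ws l hd, List.foldl_cons, srtStepB_skip]
          have hlen2 : ((rest2.dropWhile srtP).tail).length ≤ fuel := by
            have h1 := List.length_dropWhile_le srtP rest2
            have h2 : rest2.length + 2 ≤ fuel + 1 := by simpa using hlen
            simp only [List.length_tail]
            omega
          exact srtPhase2 fuel ih rest2 ws hlen2 hws
      · by_cases hb : (PySem.Chars.strip l).isEmpty
        · -- blank line at block start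
          show srtOuterA (fuel + 1) (l :: rest) (srtT ws) = _
          simp only [srtOuterA, if_neg hd]
          rw [show srtCollectA (l :: rest) [] = ([], l :: rest) from by
              simp [srtCollectA, hb]]
          rw [if_pos (show (PySem.Chars.strip ([] : List Char)).isEmpty = true from rfl)]
          rw [show srtSkipBlankA (l :: rest) = rest from by simp [srtSkipBlankA, hb]]
          rw [List.foldl_cons, srtStepB_blank 0 ws l (by omega) hb]
          exact ih rest ws (by simpa using Nat.le_of_succ_le_succ hlen) hws
        · -- text line at block start
          show srtOuterA (fuel + 1) (l :: rest) (srtT ws) = _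
          simp only [srtOuterA, if_neg hd]
          have hlen2 : (((l :: rest).dropWhile srtP).tail).length ≤ fuel := by
            have hP : srtP l = true := by simp [srtP, hb]
            rw [List.dropWhile_cons_of_pos hP]
            have h1 := List.length_dropWhile_le srtP rest
            have h2 : rest.length + 1 ≤ fuel + 1 := by simpa using hlen
            simp only [List.length_tail]
            omega
          rw [srtPhase2 fuel ih (l :: rest) ws hlen2 hws]
          rw [List.foldl_cons, List.foldl_cons,
              srtStepB_word 0 ws l (by omega) (by simpa using hb) (fun _ => by simpa using hd),
              srtStepB_word 2 ws l (by omega) (by simpa using hb) (by omega)]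

-- ===== VERDICT (by name: the statement is the Claim_ definition above) =====
theorem srt_to_transcript_spec : Claim_equal_srt_to_transcript := by
  intro s _
  show srt_to_transcript s = srt_to_transcript_alt s
  have hmain := srtMain (PySem.Chars.splitOn s.toList ['\n']).length
      (PySem.Chars.splitOn s.toList ['\n']) [] (le_refl _) (by simp)
  rw [show srtT [] = [] from rfl] at hmain
  show String.ofList (PySem.Chars.strip
      (srtOuterA (PySem.Chars.splitOn s.toList ['\n']).length
        (PySem.Chars.splitOn s.toList ['\n']) [])) = String.ofList _
  rw [hmain, srtStrip_T _ (srtFold_noSp _ (0, []) (by simp))]
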